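-- pv_equiv track=rewrite | github.com/LvanArkel/aoc | 2019/Python/day8.py | decode_layers
-- ===== SOURCE A (Python) =====
-- def decode_layers(w, h, layers):
--     result = [-1]*(w*h)
--     for i in range(w*h):
--         for j in range(len(layers)):
--             if layers[j][i] == '1':
--                 result[i] = '■'
--                 break
--             elif layers[j][i] == '0':
--                 result[i] = ' '
--                 break
--     return result
-- ===== SOURCE B (Python) =====
-- def decode_layers(w, h, layers):
--     # Painter's composite: apply layers bottom-to-top; each paint overwrites,
--     # so every pixel ends up with its topmost opaque value.
--     n = w * h
--     result = [-1] * n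
--     for layer in reversed(layers):
--         for i, c in zip(range(n), layer):
--             if c == '1':
--                 result[i] = '■'
--             elif c == '0':
--                 result[i] = ' '
--     return result
-- ===== Notes on version B (the rewrite author's own statement) =====
-- stated objective: alternative
-- what changed: B composites like a painter: it iterates layers bottom-to-top (outer loop over reversed layers, inner over pixels) overwriting each painted pixel, instead of A's per-pixel first-opaque scan with break; loop nesting and traversal order are inverted and no early exit exists.
-- outside the precondition, e.g. on decode_layers(1, 1, [['2']]): A returns [-1], B returns [-1]
import Mathlib
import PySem

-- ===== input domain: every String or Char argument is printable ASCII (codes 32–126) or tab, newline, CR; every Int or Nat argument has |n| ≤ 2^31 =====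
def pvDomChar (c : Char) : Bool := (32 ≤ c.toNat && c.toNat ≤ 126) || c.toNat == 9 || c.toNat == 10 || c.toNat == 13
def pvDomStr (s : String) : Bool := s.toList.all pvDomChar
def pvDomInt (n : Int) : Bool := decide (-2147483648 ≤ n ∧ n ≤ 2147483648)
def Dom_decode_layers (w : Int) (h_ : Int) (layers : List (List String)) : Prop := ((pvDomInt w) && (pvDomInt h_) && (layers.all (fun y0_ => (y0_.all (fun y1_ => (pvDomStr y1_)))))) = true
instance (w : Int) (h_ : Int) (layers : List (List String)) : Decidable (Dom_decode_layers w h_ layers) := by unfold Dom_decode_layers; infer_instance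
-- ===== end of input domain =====

-- B replaces A's per-pixel first-opaque scan (with break) by a painter's composite that
-- applies whole layers bottom-to-top, overwriting painted pixels; same cost, different traversal.


-- ===== PORT A =====
/-- Inner loop of A over `j` with `break`: the colour from the first layer whose pixel `i`
    is `'1'` or `'0'`.  `none` covers both the `-1` placeholder (no layer opaque at `i`) and
    the IndexError Python raises when a scanned layer is shorter than `i+1`; both situations
    are excluded by `Pre_decode_layers`, and there the port maps `none` to `""`. -/
def aPixel : List (List String) → Int → Option String
  | [], _ => none
  | l :: rest, i =>
    match PySem.List.pyGet? l i with
    | none => none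
    | some c => if c = "1" then some "■" else if c = "0" then some " " else aPixel rest i

def decode_layers (w : Int) (h_ : Int) (layers : List (List String)) : List String :=
  (PySem.List.pyRange 0 (w * h_) 1).map (fun i => (aPixel layers i).getD "")

-- ===== PORT B =====
/-- One assignment of B's inner loop body (`none` plays Python's `-1` placeholder). -/
def bStep (res : List (Option String)) (p : Int × String) : List (Option String) :=
  if p.2 = "1" then res.set p.1.toNat (some "■")
  else if p.2 = "0" then res.set p.1.toNat (some " ")
  else res

/-- B's inner loop: `for i, c in zip(range(n), layer)`. -/
def bPaint (n : Int) (res : List (Option String)) (layer : List String) : List (Option String) :=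
  ((PySem.List.pyRange 0 n 1).zip layer).foldl bStep res

def decode_layers_alt (w : Int) (h_ : Int) (layers : List (List String)) : List String :=
  let n := w * h_
  (layers.reverse.foldl (bPaint n) (List.replicate n.toNat none)).map (fun o => o.getD "")

-- ===== PRECONDITION & SPEC =====
-- Pre_ excludes exactly the inputs on which A does not return a value of the declared type
-- List String: those where A raises IndexError (a layer shorter than the pixel index is
-- scanned before an opaque pixel is found) and those where some pixel stays all-transparent,
-- on which A (and B alike, in Python) returns a list containing the int -1 — an int, not a
-- String, hence a value outside the declared return type that no port can produce.
-- (Stated through a Bool with a leading length test — implied by the quantifier via pixel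
-- w*h-1 and layer 0, so it changes nothing semantically — only so the condition evaluates
-- cheaply when w*h is large and no layer can be long enough.)
def preB_decode_layers (w : Int) (h_ : Int) (layers : List (List String)) : Bool :=
  if (w * h_).toNat ≤ (layers.getD 0 []).length then
    decide (∀ i < (w * h_).toNat, ∃ j < layers.length,
      (∀ j' ≤ j, i < (layers.getD j' []).length) ∧
      ((layers.getD j []).getD i "" = "1" ∨ (layers.getD j []).getD i "" = "0"))
  else false

def Pre_decode_layers (w : Int) (h_ : Int) (layers : List (List String)) : Prop :=
  preB_decode_layers w h_ layers = true
instance (w : Int) (h_ : Int) (layers : List (List String)) : Decidable (Pre_decode_layers w h_ layers) := by unfold Pre_decode_layers; infer_instance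

def pvWitness_decode_layers : Int × Int × List (List String) := (2, 1, [["2", "0"], ["1", "1"]])

def Spec_decode_layers (w : Int) (h_ : Int) (layers : List (List String)) (out : List String) : Prop := out = decode_layers_alt w h_ layers
instance (w : Int) (h_ : Int) (layers : List (List String)) (out : List String) : Decidable (Spec_decode_layers w h_ layers out) := by unfold Spec_decode_layers; infer_instance

-- ===== CLAIM (what is proved, stated in full; the proofs are below) =====
def Claim_equal_decode_layers : Prop := ∀ (w : Int) (h_ : Int) (layers : List (List String)), Dom_decode_layers w h_ layers → Pre_decode_layers w h_ layers → Spec_decode_layers w h_ layers (decode_layers w h_ layers)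

-- ===== LEMMAS AND PROOFS =====

/-- The colour a single cell value paints (`none` = leave as is). -/
def pix (c : String) : Option String :=
  if c = "1" then some "■" else if c = "0" then some " " else none

/-- Nat-indexed version of `bStep`. -/
def stepN (res : List (Option String)) (q : Nat × String) : List (Option String) :=
  if q.2 = "1" then res.set q.1 (some "■")
  else if q.2 = "0" then res.set q.1 (some " ")
  else res

/-- First layer (top-down) whose pixel `k` is opaque. -/
def bFirst : List (List String) → Nat → Option String
  | [], _ => none
  | l :: rest, k =>
    match pix (l.getD k "") with
    | some v => some v
    | none => bFirst rest k

lemma length_stepN (res : List (Option String)) (q : Nat × String) :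
    (stepN res q).length = res.length := by
  unfold stepN; split_ifs <;> simp

lemma length_foldl_stepN (ps : List (Nat × String)) (res : List (Option String)) :
    (ps.foldl stepN res).length = res.length := by
  induction ps generalizing res with
  | nil => rfl
  | cons p t ih => simpa [List.foldl_cons, length_stepN] using ih (stepN res p)

lemma bPaint_eq_stepN (n : Int) (res : List (Option String)) (layer : List String) :
    bPaint n res layer = ((List.range n.toNat).zip layer).foldl stepN res := by
  unfold bPaint
  rw [PySem.List.pyRange_one]
  simp only [Int.sub_zero]
  rw [List.zip_map_left, List.foldl_map]
  congr 1
  funext r q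
  simp [bStep, stepN]

lemma length_bPaint (n : Int) (res : List (Option String)) (layer : List String) :
    (bPaint n res layer).length = res.length := by
  rw [bPaint_eq_stepN]; exact length_foldl_stepN _ _

lemma foldPaint_get (layer : List String) :
    ∀ (cnt off : Nat) (res : List (Option String)) (k : Nat), k < res.length →
    (((List.range' off cnt).zip layer).foldl stepN res)[k]? =
      if off ≤ k ∧ k - off < cnt ∧ k - off < layer.length ∧ (pix (layer.getD (k - off) "")).isSome
      then some (pix (layer.getD (k - off) ""))
      else res[k]? := by
  induction layer with
  | nil =>
    intro cnt off res k hk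
    simp
  | cons c tl ih =>
    intro cnt off res k hk
    cases cnt with
    | zero => simp
    | succ c' =>
      rw [List.range'_succ, List.zip_cons_cons, List.foldl_cons]
      have hlen : (stepN res (off, c)).length = res.length := length_stepN _ _
      rw [ih c' (off + 1) (stepN res (off, c)) k (by omega)]
      by_cases hko : k = off
      · subst hko
        have h1 : ¬ (k + 1 ≤ k) := by omega
        simp only [h1, false_and, if_false]
        have hoff : k - k = 0 := by omega
        simp only [hoff, List.getD_cons_zero]
        unfold stepN pix
        by_cases hc1 : c = "1"
        · simp [hc1, hk]
        · by_cases hc0 : c = "0"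
          · simp [hc0, hk]
          · simp [hc1, hc0]
      · have hres : (stepN res (off, c))[k]? = res[k]? := by
          unfold stepN
          split_ifs <;> simp [List.getElem?_set_ne, Ne.symm hko]
        rw [hres]
        by_cases hle : off ≤ k
        · have hge : off + 1 ≤ k := by omega
          have hsub : k - off = (k - (off + 1)) + 1 := by omega
          rw [hsub, List.getD_cons_succ]
          have e1 : (off + 1 ≤ k ∧ k - (off + 1) < c' ∧ k - (off + 1) < tl.length ∧
              (pix (tl.getD (k - (off + 1)) "")).isSome) ↔
              (off ≤ k ∧ (k - (off + 1)) + 1 < c' + 1 ∧ (k - (off + 1)) + 1 < (c :: tl).length ∧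
              (pix (tl.getD (k - (off + 1)) "")).isSome) := by
            simp only [List.length_cons]
            constructor
            · rintro ⟨_, h2, h3, h4⟩; exact ⟨hle, by omega, by omega, h4⟩
            · rintro ⟨_, h2, h3, h4⟩; exact ⟨hge, by omega, by omega, h4⟩
          rw [if_congr e1 rfl rfl]
        · have h1 : ¬ (off + 1 ≤ k) := by omega
          simp only [h1, hle, false_and, if_false]

lemma foldr_paint_get (n : Int) :
    ∀ (layers : List (List String)) (res : List (Option String)) (k : Nat),
    res.length = n.toNat → k < n.toNat →
    (layers.foldr (fun layer r => bPaint n r layer) res)[k]? =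
      match bFirst layers k with
      | some v => some (some v)
      | none => res[k]? := by
  intro layers
  induction layers with
  | nil => intro res k _ _; simp [bFirst]
  | cons l rest ih =>
    intro res k hres hk
    rw [List.foldr_cons]
    have hlen : (rest.foldr (fun layer r => bPaint n r layer) res).length = n.toNat := by
      clear ih; induction rest with
      | nil => simpa using hres
      | cons a t iht => simpa [List.foldr_cons, length_bPaint] using iht
    rw [bPaint_eq_stepN, List.range_eq_range',
      foldPaint_get l n.toNat 0 _ k (by omega)]
    simp only [Nat.zero_le, Nat.sub_zero, true_and]
    by_cases hs : (pix (l.getD k "")).isSome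
    · have hkl : k < l.length := by
        by_contra hnl
        rw [List.getD_eq_default _ _ (by omega)] at hs
        simp [pix] at hs
      obtain ⟨v, hv⟩ := Option.isSome_iff_exists.mp hs
      rw [hv, if_pos ⟨hk, hkl, rfl⟩]
      simp only [bFirst, hv]
    · have hnone : pix (l.getD k "") = none := Option.not_isSome_iff_eq_none.mp hs
      rw [hnone, if_neg (by simp)]
      simp only [bFirst, hnone]
      exact ih res k hres hk

lemma aPixel_eq_bFirst :
    ∀ (layers : List (List String)) (k : Nat),
    (∃ j < layers.length, (∀ j' ≤ j, k < (layers.getD j' []).length) ∧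
      ((layers.getD j []).getD k "" = "1" ∨ (layers.getD j []).getD k "" = "0")) →
    aPixel layers (k : Int) = bFirst layers k := by
  intro layers
  induction layers with
  | nil => rintro k ⟨j, hj, _⟩; simp at hj
  | cons l rest ih =>
    rintro k ⟨j, hj, hpre, hop⟩
    have hkl : k < l.length := by simpa using hpre 0 (Nat.zero_le _)
    have hget : PySem.List.pyGet? l (k : Int) = some l[k] := by
      rw [PySem.List.pyGet?_natCast]; exact List.getElem?_eq_getElem hkl
    have hgd : l.getD k "" = l[k] := List.getD_eq_getElem l "" hkl
    unfold aPixel bFirst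
    rw [hget, hgd]
    by_cases hc1 : l[k] = "1"
    · simp [pix, hc1]
    · by_cases hc0 : l[k] = "0"
      · simp [pix, hc0]
      · simp only [hc1, hc0, if_false, pix]
        apply ih
        cases j with
        | zero =>
          exfalso
          simp only [List.getD_cons_zero, hgd] at hop
          rcases hop with h | h
          · exact hc1 h
          · exact hc0 h
        | succ s =>
          refine ⟨s, by simpa using hj, fun j' hj' => ?_, ?_⟩
          · simpa using hpre (j' + 1) (by omega)
          · simpa using hop

-- ===== VERDICT (by name: the statement is the Claim_ definition above) =====
theorem decode_layers_spec : Claim_equal_decode_layers := by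
  unfold Claim_equal_decode_layers
  intro w h_ layers _ hpreB
  have hpre : ∀ i < (w * h_).toNat, ∃ j < layers.length,
      (∀ j' ≤ j, i < (layers.getD j' []).length) ∧
      ((layers.getD j []).getD i "" = "1" ∨ (layers.getD j []).getD i "" = "0") := by
    unfold Pre_decode_layers preB_decode_layers at hpreB
    split_ifs at hpreB
    exact of_decide_eq_true hpreB
  unfold Spec_decode_layers decode_layers decode_layers_alt
  set n : Int := w * h_ with hn
  apply List.ext_getElem?
  intro k
  by_cases hk : k < n.toNat
  · have hA : ((PySem.List.pyRange 0 n 1).map (fun i => (aPixel layers i).getD ""))[k]? =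
        some ((aPixel layers (k : Int)).getD "") := by
      rw [List.getElem?_map, PySem.List.getElem?_pyRange_one,
        if_pos (show k < (n - 0).toNat by simpa using hk)]
      simp
    have hBfold : (layers.reverse.foldl (bPaint n) (List.replicate n.toNat none))[k]? =
        some (bFirst layers k) := by
      rw [List.foldl_reverse]
      rw [foldr_paint_get n layers (List.replicate n.toNat none) k (by simp) hk]
      cases hb : bFirst layers k with
      | none => simp [hk]
      | some v => rfl
    rw [hA, List.getElem?_map, hBfold]
    simp only [Option.map_some]
    rw [aPixel_eq_bFirst layers k (hpre k hk)]
  · have h1 : ((PySem.List.pyRange 0 n 1).map (fun i => (aPixel layers i).getD ""))[k]? = none := by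
      rw [List.getElem?_eq_none]
      simpa [PySem.List.length_pyRange_one] using hk
    have h2 : ((layers.reverse.foldl (bPaint n) (List.replicate n.toNat none)).map
        (fun o => o.getD ""))[k]? = none := by
      apply List.getElem?_eq_none
      rw [List.length_map]
      have hl : ∀ ls : List (List String), ∀ r : List (Option String),
          (ls.foldl (bPaint n) r).length = r.length := by
        intro ls
        induction ls with
        | nil => intro r; rfl
        | cons a t iht =>
          intro r
          rw [List.foldl_cons, iht (bPaint n r a), length_bPaint]
      rw [hl]
      simp
      omega
    rw [h1, h2]
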